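-- pv_equiv track=rewrite | github.com/AugustoCarmona/AlgoI-TPI-Optimizar | panel.py | obtener_informacion_lista_comentarios
-- ===== SOURCE A (Python) =====
-- def obtener_informacion_lista_comentarios(lista_comentarios,archivo_analizado,autor,ayuda,cont_coment):
--     """[Autor: Gaston Mondin]
--        [Ayuda: Esta funcion lo que hace es obtener la informacion que se necesita de lista_comentarios, como la cantidad
--         de comentarios, el autor de la misma, y si tiene ayuda o no.]
--     """
--     for valor_archivo in range(len(lista_comentarios[archivo_analizado])):
--             if "[Autor" in lista_comentarios[archivo_analizado][valor_archivo]: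
--                 autor = lista_comentarios[archivo_analizado][valor_archivo][lista_comentarios[archivo_analizado][valor_archivo].index(":")+2:lista_comentarios[archivo_analizado][valor_archivo].index("]")]
--             elif "[Ayuda" in lista_comentarios[archivo_analizado][valor_archivo]:
--                 ayuda = "Si"
--             elif valor_archivo>2:
--                 cont_coment+=1
--
--     return autor,ayuda,cont_coment
-- ===== SOURCE B (Python) =====
-- def obtener_informacion_lista_comentarios(lista_comentarios, archivo_analizado, autor, ayuda, cont_coment):
--     sub = lista_comentarios[archivo_analizado]
--     autores = [s for s in sub if "[Autor" in s]
--     if autores: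
--         s = autores[-1]
--         autor = s[s.index(":") + 2:s.index("]")]
--     if any("[Ayuda" in s and "[Autor" not in s for s in sub):
--         ayuda = "Si"
--     cont_coment += sum(1 for i, s in enumerate(sub)
--                        if i > 2 and "[Autor" not in s and "[Ayuda" not in s)
--     return autor, ayuda, cont_coment
-- ===== Notes on version B (the rewrite author's own statement) =====
-- stated objective: alternative
-- what changed: Replaced A's single stateful index loop with three independent computations over the selected row: the last filter match (sliced) for autor, an any-test for ayuda, and a filtered count over enumerate for cont_coment.
import Mathlib
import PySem

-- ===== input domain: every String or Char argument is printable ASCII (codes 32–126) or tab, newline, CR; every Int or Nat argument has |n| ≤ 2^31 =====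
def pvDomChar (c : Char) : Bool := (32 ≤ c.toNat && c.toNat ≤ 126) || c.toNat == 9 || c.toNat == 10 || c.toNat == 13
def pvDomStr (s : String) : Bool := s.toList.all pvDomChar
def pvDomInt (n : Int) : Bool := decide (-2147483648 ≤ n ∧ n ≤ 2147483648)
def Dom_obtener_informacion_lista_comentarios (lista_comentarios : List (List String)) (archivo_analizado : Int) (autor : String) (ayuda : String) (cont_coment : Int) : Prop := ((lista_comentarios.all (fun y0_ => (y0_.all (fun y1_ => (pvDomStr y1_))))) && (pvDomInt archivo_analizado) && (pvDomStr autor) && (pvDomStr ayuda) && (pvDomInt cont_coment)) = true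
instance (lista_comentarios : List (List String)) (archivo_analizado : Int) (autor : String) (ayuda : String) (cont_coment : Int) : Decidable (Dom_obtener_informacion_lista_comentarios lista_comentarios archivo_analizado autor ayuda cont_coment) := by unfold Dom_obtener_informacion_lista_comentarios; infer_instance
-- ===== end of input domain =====

-- B replaces A's single indexed loop with three independent computations (last filtered match,
-- an any-test, a filtered count over enumerate); same results, same cost (objective: alternative).

-- ===== PORT A =====
-- s[s.index(":")+2 : s.index("]")]  (Pre_ guarantees ":" and "]" occur in s)
def pvExtractA (s : String) : String :=
  PySem.Str.slice s (some (PySem.Str.find s ":" + 2)) (some (PySem.Str.find s "]"))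

-- the 'for valor_archivo in range(len(sub))' loop; i is valor_archivo, state (autor, ayuda, cont)
def pvLoopA : List String → Nat → String → String → Int → String × String × Int
  | [], _, autor, ayuda, cont => (autor, ayuda, cont)
  | s :: rest, i, autor, ayuda, cont =>
    if PySem.Str.isIn "[Autor" s then
      pvLoopA rest (i + 1) (pvExtractA s) ayuda cont
    else if PySem.Str.isIn "[Ayuda" s then
      pvLoopA rest (i + 1) autor "Si" cont
    else if 2 < i then
      pvLoopA rest (i + 1) autor ayuda (cont + 1)
    else
      pvLoopA rest (i + 1) autor ayuda cont

def obtener_informacion_lista_comentarios (lista_comentarios : List (List String)) (archivo_analizado : Int) (autor : String) (ayuda : String) (cont_coment : Int) : String × String × Int :=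
  match PySem.List.pyGet? lista_comentarios archivo_analizado with
  | none => (autor, ayuda, cont_coment)   -- IndexError in Python; excluded by Pre_
  | some sub => pvLoopA sub 0 autor ayuda cont_coment

-- ===== PORT B =====
-- identical slice expression in Source B (B-side copy of the helper)
def pvExtractB (s : String) : String :=
  PySem.Str.slice s (some (PySem.Str.find s ":" + 2)) (some (PySem.Str.find s "]"))

def obtener_informacion_lista_comentarios_alt (lista_comentarios : List (List String)) (archivo_analizado : Int) (autor : String) (ayuda : String) (cont_coment : Int) : String × String × Int :=
  match PySem.List.pyGet? lista_comentarios archivo_analizado with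
  | none => (autor, ayuda, cont_coment)   -- IndexError in Python; excluded by Pre_
  | some sub =>
    let autores := sub.filter (fun s => PySem.Str.isIn "[Autor" s)
    let autor' := match autores.getLast? with
      | some s => pvExtractB s
      | none => autor
    let ayuda' := if sub.any (fun s => PySem.Str.isIn "[Ayuda" s && !PySem.Str.isIn "[Autor" s) then "Si" else ayuda
    let cont' := cont_coment +
      ((PySem.List.enumerate sub 0).countP
        (fun p => decide (2 < p.1) && !PySem.Str.isIn "[Autor" p.2 && !PySem.Str.isIn "[Ayuda" p.2) : Int)
    (autor', ayuda', cont')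

-- ===== PRECONDITION & SPEC =====
-- Pre_ excludes exactly the inputs where Python A raises: an out-of-range (or wrapping past
-- both ends) archivo_analizado (IndexError), and a selected row containing an "[Autor" element
-- without ":" or without "]" (ValueError from .index).
def Pre_obtener_informacion_lista_comentarios (lista_comentarios : List (List String)) (archivo_analizado : Int) (autor : String) (ayuda : String) (cont_coment : Int) : Prop :=
  (PySem.List.pyGet? lista_comentarios archivo_analizado).isSome = true ∧
  ∀ s ∈ (PySem.List.pyGet? lista_comentarios archivo_analizado).getD [],
    PySem.Str.isIn "[Autor" s = true →
    (PySem.Str.isIn ":" s = true ∧ PySem.Str.isIn "]" s = true)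
instance (lista_comentarios : List (List String)) (archivo_analizado : Int) (autor : String) (ayuda : String) (cont_coment : Int) : Decidable (Pre_obtener_informacion_lista_comentarios lista_comentarios archivo_analizado autor ayuda cont_coment) := by unfold Pre_obtener_informacion_lista_comentarios; infer_instance

def pvWitness_obtener_informacion_lista_comentarios : List (List String) × Int × String × String × Int :=
  ([["[Autor: G]", "[Ayuda: m]", "x", "y", "z"]], 0, "a", "No", 1)

def Spec_obtener_informacion_lista_comentarios (lista_comentarios : List (List String)) (archivo_analizado : Int) (autor : String) (ayuda : String) (cont_coment : Int) (out : String × String × Int) : Prop := out = obtener_informacion_lista_comentarios_alt lista_comentarios archivo_analizado autor ayuda cont_coment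
instance (lista_comentarios : List (List String)) (archivo_analizado : Int) (autor : String) (ayuda : String) (cont_coment : Int) (out : String × String × Int) : Decidable (Spec_obtener_informacion_lista_comentarios lista_comentarios archivo_analizado autor ayuda cont_coment out) := by unfold Spec_obtener_informacion_lista_comentarios; infer_instance

-- ===== CLAIM (what is proved, stated in full; the proofs are below) =====
def Claim_equal_obtener_informacion_lista_comentarios : Prop := ∀ (lista_comentarios : List (List String)) (archivo_analizado : Int) (autor : String) (ayuda : String) (cont_coment : Int), Dom_obtener_informacion_lista_comentarios lista_comentarios archivo_analizado autor ayuda cont_coment → Pre_obtener_informacion_lista_comentarios lista_comentarios archivo_analizado autor ayuda cont_coment → Spec_obtener_informacion_lista_comentarios lista_comentarios archivo_analizado autor ayuda cont_coment (obtener_informacion_lista_comentarios lista_comentarios archivo_analizado autor ayuda cont_coment)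

-- ===== LEMMAS AND PROOFS =====
-- A's loop computes B's three independent quantities (proved totally; Pre_ is only needed
-- so that the PYTHON A returns at all).
lemma pvLoopA_eq (sub : List String) : ∀ (i : Nat) (autor ayuda : String) (cont : Int),
    pvLoopA sub i autor ayuda cont =
      ((match (sub.filter (fun s => PySem.Str.isIn "[Autor" s)).getLast? with
         | some s => pvExtractB s
         | none => autor),
       (if sub.any (fun s => PySem.Str.isIn "[Ayuda" s && !PySem.Str.isIn "[Autor" s) then "Si" else ayuda),
       cont + ((PySem.List.enumerate sub (i : Int)).countP
         (fun p => decide (2 < p.1) && !PySem.Str.isIn "[Autor" p.2 && !PySem.Str.isIn "[Ayuda" p.2) : Int)) := by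
  induction sub with
  | nil => intro i autor ayuda cont; simp [pvLoopA]
  | cons s rest ih =>
    intro i autor ayuda cont
    have hcast : ((i : Int) + 1) = ((i + 1 : Nat) : Int) := by push_cast; ring
    have hd : (decide (2 < ((i : Nat) : Int))) = decide (2 < i) := by
      simp only [decide_eq_decide]; exact_mod_cast Iff.rfl
    rw [PySem.List.enumerate_cons, List.countP_cons]
    simp only [pvLoopA, List.filter_cons, List.any_cons]
    by_cases hA : PySem.Str.isIn "[Autor" s = true
    · have hA' : PySem.Chars.isIn ['[','A','u','t','o','r'] s.toList = true := by simpa using hA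
      rw [if_pos hA, ih (i+1) (pvExtractA s) ayuda cont, ← hcast]
      refine Prod.ext ?_ (Prod.ext ?_ ?_)
      · rw [if_pos hA, List.getLast?_cons]
        cases h : (List.filter (fun s => PySem.Str.isIn "[Autor" s) rest).getLast? <;> simp [h, pvExtractA, pvExtractB]
      · simp [hA']
      · simp [hA']
    · have hA' : PySem.Chars.isIn ['[','A','u','t','o','r'] s.toList = false := by simpa using hA
      rw [if_neg hA]
      by_cases hY : PySem.Str.isIn "[Ayuda" s = true
      · have hY' : PySem.Chars.isIn ['[','A','y','u','d','a'] s.toList = true := by simpa using hY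
        rw [if_pos hY, ih (i+1) autor "Si" cont, ← hcast]
        refine Prod.ext ?_ (Prod.ext ?_ ?_)
        · simp [hA']
        · simp [hY', hA']
        · simp [hY']
      · have hY' : PySem.Chars.isIn ['[','A','y','u','d','a'] s.toList = false := by simpa using hY
        rw [if_neg hY]
        by_cases hi : 2 < i
        · rw [if_pos hi, ih (i+1) autor ayuda (cont+1), ← hcast]
          refine Prod.ext ?_ (Prod.ext ?_ ?_)
          · simp [hA']
          · simp [hY', hA']
          · simp [hY', hA', hi]
            ring
        · rw [if_neg hi, ih (i+1) autor ayuda cont, ← hcast]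
          refine Prod.ext ?_ (Prod.ext ?_ ?_)
          · simp [hA']
          · simp [hY', hA']
          · simp [hY', hA', hi]

-- ===== VERDICT (by name: the statement is the Claim_ definition above) =====
theorem obtener_informacion_lista_comentarios_spec : Claim_equal_obtener_informacion_lista_comentarios := by
  intro lista archivo autor ayuda cont _hDom _hPre
  unfold Spec_obtener_informacion_lista_comentarios
  unfold obtener_informacion_lista_comentarios obtener_informacion_lista_comentarios_alt
  cases h : PySem.List.pyGet? lista archivo with
  | none => rfl
  | some sub => simpa using pvLoopA_eq sub 0 autor ayuda cont
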